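-- pv_equiv track=rewrite | github.com/admk/sembr | sembr/processors/latex.py | _process_modes
-- ===== SOURCE A (Python) =====
-- from typing import List, Dict, Any
--
-- def _process_modes(lines: List[str]) -> tuple[List[str], List[str]]:
--     """
--     Process LaTeX mode transitions.
--
--     Args:
--         lines: List of text lines
--
--     Returns:
--         Tuple of (processed_lines, modes)
--     """
--     new_lines = []
--     modes = []
--     prev_status = "start"
--     for line in lines:
--         if line.startswith("%"):
--             status = "comment"
--         elif line.endswith("%"):
--             status = "percent"
--             line = line.rstrip("%")
--         else:
--             status = "normal"
--         match (prev_status, status):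
--             case ("start", _):
--                 pass
--             case ("normal", _):
--                 modes.append("space")
--             case ("percent", _):
--                 modes.append("nospace")
--             case ("comment", "normal"):
--                 modes.append("break")
--             case ("comment", "percent"):
--                 modes.append("break")
--             case ("comment", "comment"):
--                 modes.append("comment")
--             case (_, "comment"):
--                 modes.append("comment")
--             case _:
--                 raise ValueError(
--                     f"Unknown status transition: {prev_status} -> {status}."
--                 )
--         new_lines.append(line)
--         prev_status = status
--     # Last transition always forces a break
--     modes.append("break")
--     return new_lines, modes
-- ===== SOURCE B (Python) =====
-- def _process_modes(lines):
--     """Reversed-order lookahead version: walk the lines back-to-front and decide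
--     each inter-line mode directly from the raw current line and the raw next
--     line (no status tokens, no carried classification state), building both
--     outputs in reverse and flipping them at the end."""
--     new_lines = []
--     modes = []
--     nxt = None  # the raw line that follows `cur` in the original order
--     for cur in reversed(lines):
--         if cur.startswith("%"):
--             new_lines.append(cur)
--             mode = "comment" if nxt is not None and nxt.startswith("%") else "break"
--         elif cur.endswith("%"):
--             new_lines.append(cur.rstrip("%"))
--             mode = "nospace"
--         else:
--             new_lines.append(cur)
--             mode = "space"
--         if nxt is not None:
--             modes.append(mode)
--         nxt = cur
--     new_lines.reverse()
--     modes.reverse()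
--     modes.append("break")
--     return new_lines, modes
-- ===== Notes on version B (the rewrite author's own statement) =====
-- stated objective: alternative
-- what changed: Replaces A's forward loop that carries a prev_status token through a match-based transition table with a reversed-order loop that decides each inter-line mode by looking ahead at the raw next line (no status classification is ever stored or carried), building both output lists back-to-front and reversing them at the end.
import Mathlib
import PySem

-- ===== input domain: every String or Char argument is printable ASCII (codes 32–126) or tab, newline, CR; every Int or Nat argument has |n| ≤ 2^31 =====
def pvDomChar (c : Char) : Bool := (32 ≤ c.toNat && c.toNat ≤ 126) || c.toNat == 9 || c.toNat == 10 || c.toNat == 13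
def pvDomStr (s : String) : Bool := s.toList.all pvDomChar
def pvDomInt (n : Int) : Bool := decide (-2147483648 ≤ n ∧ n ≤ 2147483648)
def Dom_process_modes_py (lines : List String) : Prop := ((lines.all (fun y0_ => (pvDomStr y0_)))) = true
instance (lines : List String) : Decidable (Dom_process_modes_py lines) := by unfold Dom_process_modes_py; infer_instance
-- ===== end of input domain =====

-- B replaces A's forward loop carrying a prev_status token and a transition match by a
-- reversed-order loop that derives each mode by looking ahead at the raw next line (alternative decomposition, same cost).

-- s.rstrip("%"): PySem has no rstrip-with-chars primitive, so it is ported by hand,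
-- exact on all strings: drop the maximal run of '%' from the right.
def pvRstripPercent (s : String) : String :=
  String.ofList ((s.toList.reverse.dropWhile (fun c => c == '%')).reverse)

-- ===== PORT A =====
-- one step of A's loop; state = (new_lines, modes, prev_status)
def stepA (st : List String × List String × String) (line : String) :
    List String × List String × String :=
  let (new_lines, modes, prev_status) := st
  let (status, line) :=
    if PySem.Str.startswith line "%" then ("comment", line)
    else if PySem.Str.endswith line "%" then ("percent", pvRstripPercent line)
    else ("normal", line)
  let modes :=
    if prev_status = "start" then modes
    else if prev_status = "normal" then modes ++ ["space"]
    else if prev_status = "percent" then modes ++ ["nospace"]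
    else if prev_status = "comment" then
      (if status = "normal" then modes ++ ["break"]
       else if status = "percent" then modes ++ ["break"]
       else modes ++ ["comment"])
    else -- case (_, "comment"); the ValueError branch is unreachable (prev_status is always one of the four strings)
      modes ++ ["comment"]
  (new_lines ++ [line], modes, status)

def process_modes_py (lines : List String) : List String × List String :=
  let st := lines.foldl stepA ([], [], "start")
  (st.1, st.2.1 ++ ["break"])

-- ===== PORT B =====
-- one step of B's reversed loop; state = (new_lines, modes, nxt), nxt = the raw following line
def stepB (st : List String × List String × Option String) (cur : String) :
    List String × List String × Option String :=
  let (new_lines, modes, nxt) := st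
  let (new_lines, mode) :=
    if PySem.Str.startswith cur "%" then
      (new_lines ++ [cur],
       match nxt with
       | some n => if PySem.Str.startswith n "%" then "comment" else "break"
       | none => "break")
    else if PySem.Str.endswith cur "%" then (new_lines ++ [pvRstripPercent cur], "nospace")
    else (new_lines ++ [cur], "space")
  let modes := match nxt with | some _ => modes ++ [mode] | none => modes
  (new_lines, modes, some cur)

def process_modes_py_alt (lines : List String) : List String × List String :=
  let st := lines.reverse.foldl stepB ([], [], none)
  (st.1.reverse, st.2.1.reverse ++ ["break"])

-- ===== PRECONDITION & SPEC =====
def Spec_process_modes_py (lines : List String) (out : List String × List String) : Prop := out = process_modes_py_alt lines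
instance (lines : List String) (out : List String × List String) : Decidable (Spec_process_modes_py lines out) := by unfold Spec_process_modes_py; infer_instance

-- ===== CLAIM (what is proved, stated in full; the proofs are below) =====
def Claim_equal_process_modes_py : Prop := ∀ (lines : List String), Dom_process_modes_py lines → Spec_process_modes_py lines (process_modes_py lines)

-- ===== LEMMAS AND PROOFS =====

-- proof-only helpers: per-line classification and the pairwise transition function
def pvClassify (line : String) : String × String :=
  if PySem.Str.startswith line "%" then ("comment", line)
  else if PySem.Str.endswith line "%" then ("percent", pvRstripPercent line)
  else ("normal", line)

def pvTrans (prev cur : String) : String :=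
  if prev = "normal" then "space"
  else if prev = "percent" then "nospace"
  else if cur = "comment" then "comment" else "break"

def pvPairModes (lines : List String) : List String :=
  (lines.zip lines.tail).map (fun p => pvTrans (pvClassify p.1).1 (pvClassify p.2).1)

lemma pvClassify_fst_mem (line : String) :
    (pvClassify line).1 = "normal" ∨ (pvClassify line).1 = "percent" ∨ (pvClassify line).1 = "comment" := by
  simp only [pvClassify]; split_ifs <;> simp

lemma stepA_eq (st : List String × List String × String) (line : String)
    (h : st.2.2 = "normal" ∨ st.2.2 = "percent" ∨ st.2.2 = "comment") :
    stepA st line =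
      (st.1 ++ [(pvClassify line).2], st.2.1 ++ [pvTrans st.2.2 (pvClassify line).1],
       (pvClassify line).1) := by
  obtain ⟨nl, ms, prev⟩ := st
  simp only [stepA, pvClassify, pvTrans]
  split_ifs <;> simp_all

lemma foldl_stepA (ls : List String) :
    ∀ (nl ms : List String) (prev : String),
      prev = "normal" ∨ prev = "percent" ∨ prev = "comment" →
    ls.foldl stepA (nl, ms, prev) =
      (nl ++ (ls.map pvClassify).map Prod.snd,
       ms ++ ((prev :: (ls.map pvClassify).map Prod.fst).zip ((ls.map pvClassify).map Prod.fst)).map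
         (fun pc => pvTrans pc.1 pc.2),
       ((ls.map pvClassify).map Prod.fst).getLastD prev) := by
  induction ls with
  | nil => intro nl ms prev _; simp
  | cons l rest ih =>
      intro nl ms prev hprev
      have hstep := stepA_eq (nl, ms, prev) l hprev
      simp only [List.foldl_cons, hstep]
      rw [ih _ _ _ (pvClassify_fst_mem l)]
      refine Prod.ext (by simp) (Prod.ext (by simp [List.zip_cons_cons]) ?_)
      simp only [List.map_cons, List.map_map, List.getLastD_cons]

lemma stepB_eq (nl ms : List String) (nxt : Option String) (cur : String) :
    stepB (nl, ms, nxt) cur =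
      (nl ++ [(pvClassify cur).2],
       (match nxt with
        | some n => ms ++ [pvTrans (pvClassify cur).1 (pvClassify n).1]
        | none => ms),
       some cur) := by
  cases nxt with
  | none => simp only [stepB, pvClassify]; split_ifs <;> simp
  | some n =>
      simp only [stepB, pvClassify, pvTrans]
      split_ifs <;> simp_all

lemma foldr_stepB (lines : List String) :
    lines.foldr (fun x s => stepB s x) ([], [], none) =
      (((lines.map pvClassify).map Prod.snd).reverse, (pvPairModes lines).reverse, lines.head?) := by
  induction lines with
  | nil => simp [pvPairModes]
  | cons cur rest ih =>
      simp only [List.foldr_cons, ih, stepB_eq]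
      cases rest with
      | nil => simp [pvPairModes]
      | cons r rs =>
          refine Prod.ext (by simp) (Prod.ext ?_ (by simp))
          simp [pvPairModes, List.zip_cons_cons]

lemma pv_zip_modes (f : String → String) : ∀ (l : String) (rest : List String),
    ((f l :: rest.map f).zip (rest.map f)).map (fun pc => pvTrans pc.1 pc.2)
      = ((l :: rest).zip rest).map (fun p => pvTrans (f p.1) (f p.2)) := by
  intro l rest
  induction rest generalizing l with
  | nil => simp
  | cons r rs ih => simp [List.zip_cons_cons, ih r]

theorem process_modes_py_spec_aux (lines : List String) :
    process_modes_py lines = process_modes_py_alt lines := by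
  have hB : process_modes_py_alt lines =
      ((lines.map pvClassify).map Prod.snd, pvPairModes lines ++ ["break"]) := by
    simp only [process_modes_py_alt, List.foldl_reverse, foldr_stepB]
    simp
  rw [hB]
  cases lines with
  | nil => rfl
  | cons l rest =>
      have hstep : stepA ([], [], "start") l = ([(pvClassify l).2], [], (pvClassify l).1) := by
        simp only [stepA, pvClassify]
        split_ifs <;> simp
      simp only [process_modes_py, List.foldl_cons, hstep,
        foldl_stepA rest [(pvClassify l).2] [] (pvClassify l).1 (pvClassify_fst_mem l)]
      refine Prod.ext (by simp) ?_
      simp only [List.map_map, List.nil_append]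
      rw [show (Prod.fst ∘ pvClassify) = (fun x => (pvClassify x).1) from rfl]
      rw [pv_zip_modes (fun x => (pvClassify x).1) l rest]
      simp [pvPairModes]

-- ===== VERDICT (by name: the statement is the Claim_ definition above) =====
theorem process_modes_py_spec : Claim_equal_process_modes_py := by
  intro lines _
  exact process_modes_py_spec_aux lines
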